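-- pv_equiv track=rewrite | github.com/Esri/solutions-geoprocessing-toolbox | clearing_operations/scripts/RefGrid.py | _findGridLetters
-- ===== SOURCE A (Python) =====
-- def _findGridLetters (zoneNum, northing, easting):
--   '''
--   Retrieve the square identification for a given coordinate pair & zone
--   See "lettersHelper" function documentation for more details.
--   '''
--   zoneNum = int(zoneNum)
--   northing = float(northing)
--   easting = float(easting)
--   row = 1
--   #northing coordinate to single-meter precision
--   north_1m = round(northing)
--   # Get the row position for the square identifier that contains the point
--   while north_1m >= 100000:
--     north_1m = north_1m - 100000
--     row = row + 1
--   # cycle repeats (wraps) after 20 rows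
--   row = row % 20
--   col = 0
--   # easting coordinate to single-meter precision
--   east_1m = round(easting)
--   # Get the column position for the square identifier that contains the point
--   while east_1m >= 100000:
--     east_1m = east_1m - 100000
--     col = col + 1
--   #cycle repeats (wraps) after 8 columns
--   col = col % 8
--
--   return _lettersHelper(_findSet(zoneNum), row, col);
--
-- def _lettersHelper(set, row, col):
--   '''
--   Retrieve the Square Identification (two-character letter code), for the
--   given row, column and set identifier
--   '''
--   # handle case of last row
--
--   if row == 0:
--     row = 20 - 1
--   else:
--     row = row - 1
--   # handle case of last column
--   if col == 0:
--     col = 8 - 1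
--   else:
--     col = col - 1
--
--   if set == 1:
--     l1 = "ABCDEFGH" # column ids
--     l2 = "ABCDEFGHJKLMNPQRSTUV" # row ids
--   elif set == 2:
--     l1 = "JKLMNPQR"
--     l2 = "FGHJKLMNPQRSTUVABCDE"
--   elif set == 3:
--     l1 = "STUVWXYZ"
--     l2 = "ABCDEFGHJKLMNPQRSTUV"
--   elif set == 4:
--     l1 = "ABCDEFGH"
--     l2 = "FGHJKLMNPQRSTUVABCDE"
--   elif set == 5:
--     l1 = "JKLMNPQR"
--     l2 = "ABCDEFGHJKLMNPQRSTUV"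
--   else:
--     l1 = "STUVWXYZ"
--     l2 = "FGHJKLMNPQRSTUVABCDE"
--
--   return l1[col] + l2[row]
--
-- def _findSet(zoneNum):
--   '''
--   There are six unique sets, corresponding to individual grid numbers in
--   sets 1-6, 7-12, 13-18, etc. Set 1 is the same as sets 7, 13, ..;
--   Set 2 is the same as sets 8, 14, ..
--   '''
--   zoneNum = int(zoneNum)
--   zoneNum = zoneNum % 6
--   if zoneNum == 0:
--     return 6
--   elif zoneNum == 1:
--     return 1
--   elif zoneNum == 2:
--     return 2
--   elif zoneNum == 3:
--     return 3
--   elif zoneNum == 4: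
--     return 4
--   elif zoneNum == 5:
--     return 5
--   else:
--     return -1
-- ===== SOURCE B (Python) =====
-- # Closed-form re-implementation: integer division replaces repeated subtraction,
-- # and table lookup by (zone-1)%6 replaces the six-way if/elif chain.
-- _COLS = ["ABCDEFGH", "JKLMNPQR", "STUVWXYZ"]
-- _ROWS = ["ABCDEFGHJKLMNPQRSTUV", "FGHJKLMNPQRSTUVABCDE"]
--
-- def _findGridLetters(zoneNum, northing, easting):
--     s = (int(zoneNum) - 1) % 6
--     row = max(0, round(float(northing)) // 100000) % 20
--     col = (max(0, round(float(easting)) // 100000) - 1) % 8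
--     return _COLS[s % 3][col] + _ROWS[s % 2][row]
-- ===== Notes on version B (the rewrite author's own statement) =====
-- stated objective: simpler
-- what changed: Each repeated-subtraction while-loop is replaced by a closed-form max(0, coord//100000) floor division, and the six-way if/elif letter-table chain plus the row/col wrap-around helper by direct modular index arithmetic ((zone-1)%6 table lookup, row=count%20, col=(count-1)%8).
import Mathlib
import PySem

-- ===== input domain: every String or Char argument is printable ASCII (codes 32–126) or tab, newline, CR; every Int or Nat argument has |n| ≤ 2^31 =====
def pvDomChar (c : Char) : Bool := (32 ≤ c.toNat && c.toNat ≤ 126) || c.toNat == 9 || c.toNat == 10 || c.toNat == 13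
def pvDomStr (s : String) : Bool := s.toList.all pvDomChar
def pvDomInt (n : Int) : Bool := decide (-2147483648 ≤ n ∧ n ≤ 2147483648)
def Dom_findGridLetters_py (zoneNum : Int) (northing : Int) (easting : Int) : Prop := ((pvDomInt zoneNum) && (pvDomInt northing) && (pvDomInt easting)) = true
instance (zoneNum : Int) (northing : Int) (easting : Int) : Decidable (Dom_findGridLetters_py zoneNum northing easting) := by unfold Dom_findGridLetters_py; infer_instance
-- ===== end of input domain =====

-- B replaces A's repeated-subtraction while-loops by closed-form floor divisions and
-- the six-way if/elif table by indexed lookup (objective: simpler).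
-- Note: round(float(k)) = k for our Int inputs (|k| ≤ 2^31, exact in a double), so the
-- float round-trip of A is the identity in both ports.

-- ===== PORT A =====
-- 'while x >= 100000: x -= 100000; cnt += 1' — returns the final (x, cnt)
def pvSquareLoop (x : Int) (cnt : Int) : Int × Int :=
  if 100000 ≤ x then pvSquareLoop (x - 100000) (cnt + 1) else (x, cnt)
termination_by x.toNat
decreasing_by omega

def findSet_py (zoneNum : Int) : Int :=
  let z := PySem.Int.mod zoneNum 6
  if z = 0 then 6
  else if z = 1 then 1
  else if z = 2 then 2
  else if z = 3 then 3
  else if z = 4 then 4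
  else if z = 5 then 5
  else -1

def lettersHelper_py (set : Int) (row : Int) (col : Int) : String :=
  let row := if row = 0 then 20 - 1 else row - 1
  let col := if col = 0 then 8 - 1 else col - 1
  let p : String × String :=
    if set = 1 then ("ABCDEFGH", "ABCDEFGHJKLMNPQRSTUV")
    else if set = 2 then ("JKLMNPQR", "FGHJKLMNPQRSTUVABCDE")
    else if set = 3 then ("STUVWXYZ", "ABCDEFGHJKLMNPQRSTUV")
    else if set = 4 then ("ABCDEFGH", "FGHJKLMNPQRSTUVABCDE")
    else if set = 5 then ("JKLMNPQR", "ABCDEFGHJKLMNPQRSTUV")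
    else ("STUVWXYZ", "FGHJKLMNPQRSTUVABCDE")
  -- l1[col] + l2[row]; at every call site col ∈ [0,8) and row ∈ [0,20), so no IndexError
  match PySem.Str.pyGet? p.1 col, PySem.Str.pyGet? p.2 row with
  | some a, some b => String.ofList [a, b]
  | _, _ => ""

def findGridLetters_py (zoneNum : Int) (northing : Int) (easting : Int) : String :=
  let rowPair := pvSquareLoop northing 1          -- north_1m = round(northing); row = 1; while-loop
  let row := PySem.Int.mod rowPair.2 20           -- row % 20
  let colPair := pvSquareLoop easting 0           -- east_1m = round(easting); col = 0; while-loop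
  let col := PySem.Int.mod colPair.2 8            -- col % 8
  lettersHelper_py (findSet_py zoneNum) row col

-- ===== PORT B =====
def pvCols : List String := ["ABCDEFGH", "JKLMNPQR", "STUVWXYZ"]
def pvRows : List String := ["ABCDEFGHJKLMNPQRSTUV", "FGHJKLMNPQRSTUVABCDE"]

def findGridLetters_py_alt (zoneNum : Int) (northing : Int) (easting : Int) : String :=
  let s := PySem.Int.mod (zoneNum - 1) 6
  let row := PySem.Int.mod (max 0 (PySem.Int.floordiv northing 100000)) 20
  let col := PySem.Int.mod (max 0 (PySem.Int.floordiv easting 100000) - 1) 8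
  -- _COLS[s % 3][col] + _ROWS[s % 2][row]; indices always in range
  match PySem.Str.pyGet? (PySem.List.pyGetD pvCols (PySem.Int.mod s 3) "") col,
        PySem.Str.pyGet? (PySem.List.pyGetD pvRows (PySem.Int.mod s 2) "") row with
  | some a, some b => String.ofList [a, b]
  | _, _ => ""

-- ===== PRECONDITION & SPEC =====
def Spec_findGridLetters_py (zoneNum : Int) (northing : Int) (easting : Int) (out : String) : Prop := out = findGridLetters_py_alt zoneNum northing easting
instance (zoneNum : Int) (northing : Int) (easting : Int) (out : String) : Decidable (Spec_findGridLetters_py zoneNum northing easting out) := by unfold Spec_findGridLetters_py; infer_instance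

-- ===== CLAIM (what is proved, stated in full; the proofs are below) =====
def Claim_equal_findGridLetters_py : Prop := ∀ (zoneNum : Int) (northing : Int) (easting : Int), Dom_findGridLetters_py zoneNum northing easting → Spec_findGridLetters_py zoneNum northing easting (findGridLetters_py zoneNum northing easting)

-- ===== LEMMAS AND PROOFS =====

-- the loop counts ⌊x/100000⌋ steps (0 if x < 100000, in particular for negative x)
theorem pvSquareLoop_snd (x cnt : Int) :
    (pvSquareLoop x cnt).2 = cnt + max 0 (x / 100000) := by
  induction x, cnt using pvSquareLoop.induct with
  | case1 x cnt h ih =>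
      rw [pvSquareLoop, if_pos h, ih]
      omega
  | case2 x cnt h =>
      rw [pvSquareLoop, if_neg h]
      simp only
      omega

-- the finite table check: all 6 × 20 × 8 residue combinations agree
theorem pvTable : ∀ (m : Nat), m < 6 → ∀ (a : Nat), a < 20 → ∀ (b : Nat), b < 8 →
    lettersHelper_py (findSet_py (m : Int)) (PySem.Int.mod (1 + (a : Int)) 20) (PySem.Int.mod (b : Int) 8) =
      (match PySem.Str.pyGet? (PySem.List.pyGetD pvCols (PySem.Int.mod (PySem.Int.mod (((m : Int) + 5) % 6) 6) 3) "") (((b : Int) + 7) % 8),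
             PySem.Str.pyGet? (PySem.List.pyGetD pvRows (PySem.Int.mod (PySem.Int.mod (((m : Int) + 5) % 6) 6) 2) "") ((a : Int)) with
       | some c, some d => String.ofList [c, d]
       | _, _ => "") := by
  decide

theorem findSet_py_congr (x y : Int) (h : PySem.Int.mod x 6 = PySem.Int.mod y 6) :
    findSet_py x = findSet_py y := by
  simp only [findSet_py, h]

theorem findGridLetters_py_spec : Claim_equal_findGridLetters_py := by
  intro z n e _
  show findGridLetters_py z n e = findGridLetters_py_alt z n e
  simp only [findGridLetters_py, findGridLetters_py_alt, pvSquareLoop_snd,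
    PySem.Int.floordiv_eq_ediv_of_pos (b := 100000) (by norm_num), zero_add]
  set qN : Int := max 0 (n / 100000) with hqN
  set qE : Int := max 0 (e / 100000) with hqE
  have hqN0 : 0 ≤ qN := le_max_left _ _
  have hqE0 : 0 ≤ qE := le_max_left _ _
  set m : Nat := (z % 6).toNat with hm
  set a : Nat := (qN % 20).toNat with ha
  set b : Nat := (qE % 8).toNat with hb
  have hmz : (m : Int) = z % 6 := by omega
  have haq : (a : Int) = qN % 20 := by omega
  have hbq : (b : Int) = qE % 8 := by omega
  have h1 : findSet_py z = findSet_py (m : Int) := by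
    apply findSet_py_congr
    rw [PySem.Int.mod_eq_emod_of_pos (by norm_num), PySem.Int.mod_eq_emod_of_pos (by norm_num)]
    omega
  have h2 : PySem.Int.mod (1 + qN) 20 = PySem.Int.mod (1 + (a : Int)) 20 := by
    rw [PySem.Int.mod_eq_emod_of_pos (by norm_num), PySem.Int.mod_eq_emod_of_pos (by norm_num)]
    omega
  have h3 : PySem.Int.mod qE 8 = PySem.Int.mod (b : Int) 8 := by
    rw [PySem.Int.mod_eq_emod_of_pos (by norm_num), PySem.Int.mod_eq_emod_of_pos (by norm_num)]
    omega
  have h4 : PySem.Int.mod (z - 1) 6 = PySem.Int.mod (((m : Int) + 5) % 6) 6 := by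
    rw [PySem.Int.mod_eq_emod_of_pos (by norm_num), PySem.Int.mod_eq_emod_of_pos (by norm_num)]
    omega
  have h5 : PySem.Int.mod qN 20 = (a : Int) := by
    rw [PySem.Int.mod_eq_emod_of_pos (by norm_num)]
    omega
  have h6 : PySem.Int.mod (qE - 1) 8 = ((b : Int) + 7) % 8 := by
    rw [PySem.Int.mod_eq_emod_of_pos (by norm_num)]
    omega
  rw [h1, h2, h3, h4, h5, h6]
  have := pvTable m (by omega) a (by omega) b (by omega)
  rw [this]
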